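-- pv_equiv track=rewrite | github.com/shaswata-das/basic-mcp-server | mcp_server/services/scanners/csharp_scanner.py | _extract_namespaces
-- ===== SOURCE A (Python) =====
-- from typing import Dict, List, Set, Tuple, Any, Optional
--
-- def _extract_namespaces(file_results: List[Dict[str, Any]]) -> Dict[str, List[str]]:
--     """Extract namespaces from file results
--
--     Args:
--         file_results: List of file analysis results
--
--     Returns:
--         Mapping of namespaces to files
--     """
--     namespaces = {}
--
--     for file_result in file_results:
--         namespace = file_result.get("namespace")
--         if namespace:
--             if namespace not in namespaces:
--                 namespaces[namespace] = []
--
--             namespaces[namespace].append(file_result["path"])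
--
--     return namespaces
-- ===== SOURCE B (Python) =====
-- from typing import Dict, List, Any
--
-- def _extract_namespaces(file_results: List[Dict[str, Any]]) -> Dict[str, List[str]]:
--     """Extract namespaces from file results (two-pass: dedup keys, then group)."""
--     keys = []
--     for r in file_results:
--         ns = r.get("namespace")
--         if ns and ns not in keys:
--             keys.append(ns)
--     return {ns: [r["path"] for r in file_results if r.get("namespace") == ns]
--             for ns in keys}
-- ===== Notes on version B (the rewrite author's own statement) =====
-- stated objective: alternative
-- what changed: Replaces the single-pass incremental dict build (membership test + in-place list append per record) with a two-pass scheme: first collect the distinct truthy namespaces in first-occurrence order, then build each namespace's path list by a comprehension over the whole input.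
import Mathlib
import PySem

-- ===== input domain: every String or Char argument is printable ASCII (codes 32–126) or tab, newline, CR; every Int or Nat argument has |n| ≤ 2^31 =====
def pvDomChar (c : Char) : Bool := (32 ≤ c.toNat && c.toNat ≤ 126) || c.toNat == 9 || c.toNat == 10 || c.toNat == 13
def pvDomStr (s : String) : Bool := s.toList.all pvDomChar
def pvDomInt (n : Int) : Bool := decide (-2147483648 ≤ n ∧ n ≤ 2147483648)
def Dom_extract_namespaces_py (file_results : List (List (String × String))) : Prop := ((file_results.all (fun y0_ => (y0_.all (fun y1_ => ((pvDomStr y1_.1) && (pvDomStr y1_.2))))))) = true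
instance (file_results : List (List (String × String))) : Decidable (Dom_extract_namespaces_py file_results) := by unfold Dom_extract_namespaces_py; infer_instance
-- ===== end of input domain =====

-- B rebuilds the mapping in two passes (distinct keys first, then one comprehension per key)
-- instead of A's single incremental dict-building loop; alternative decomposition, not faster.
-- Pre_ excludes inputs where A raises KeyError ("path" missing on a record with a truthy namespace).

-- ===== PORT A =====
-- one iteration of A's loop body
def pvStepA (namespaces : PySem.Dict String (List String)) (file_result : List (String × String)) :
    PySem.Dict String (List String) :=
  match (PySem.Dict.ofList file_result).get? "namespace" with
  | none => namespaces
  | some ns =>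
    if ns = "" then namespaces
    else
      let namespaces :=
        if namespaces.contains ns then namespaces else namespaces.insert ns []
      -- namespaces[namespace].append(file_result["path"]); "path" present by Pre_, getD "" stands for the raise
      namespaces.modify ns [] (fun ps => ps ++ [((PySem.Dict.ofList file_result).get? "path").getD ""])

def extract_namespaces_py (file_results : List (List (String × String))) : List (String × List String) :=
  (file_results.foldl pvStepA PySem.Dict.empty).items

-- ===== PORT B =====
-- first pass of B: distinct truthy namespaces in first-occurrence order
def pvKeysStep (ks : List String) (r : List (String × String)) : List String :=
  match (PySem.Dict.ofList r).get? "namespace" with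
  | none => ks
  | some ns => if ns ≠ "" ∧ ns ∉ ks then ks ++ [ns] else ks

def extract_namespaces_py_alt (file_results : List (List (String × String))) : List (String × List String) :=
  let keys := file_results.foldl pvKeysStep []
  keys.map (fun ns =>
    (ns, (file_results.filter (fun r => (PySem.Dict.ofList r).get? "namespace" == some ns)).map
           (fun r => ((PySem.Dict.ofList r).get? "path").getD "")))

-- ===== PRECONDITION & SPEC =====
-- Pre_ excludes exactly the inputs where A raises KeyError: a record whose "namespace" is a
-- non-empty string but which has no "path" key (B raises KeyError there too).
def Pre_extract_namespaces_py (file_results : List (List (String × String))) : Prop :=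
  ∀ r ∈ file_results,
    ((PySem.Dict.ofList r).get? "namespace").getD "" ≠ "" →
      ((PySem.Dict.ofList r).get? "path").isSome
instance (file_results : List (List (String × String))) : Decidable (Pre_extract_namespaces_py file_results) := by
  unfold Pre_extract_namespaces_py; infer_instance

def pvWitness_extract_namespaces_py : (List (List (String × String))) :=
  [[("namespace", "App.Core"), ("path", "a.cs")], [("path", "b.cs")], [("namespace", "App.Core"), ("path", "c.cs")]]

def Spec_extract_namespaces_py (file_results : List (List (String × String))) (out : List (String × List String)) : Prop := out = extract_namespaces_py_alt file_results
instance (file_results : List (List (String × String))) (out : List (String × List String)) : Decidable (Spec_extract_namespaces_py file_results out) := by unfold Spec_extract_namespaces_py; infer_instance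

-- ===== CLAIM (what is proved, stated in full; the proofs are below) =====
def Claim_equal_extract_namespaces_py : Prop := ∀ (file_results : List (List (String × String))), Dom_extract_namespaces_py file_results → Pre_extract_namespaces_py file_results → Spec_extract_namespaces_py file_results (extract_namespaces_py file_results)

-- ===== LEMMAS AND PROOFS =====

-- the (key, path) pair A's loop body acts on, when the record has a truthy namespace
def pvEntry? (r : List (String × String)) : Option (String × String) :=
  match (PySem.Dict.ofList r).get? "namespace" with
  | none => none
  | some ns => if ns = "" then none
               else some (ns, ((PySem.Dict.ofList r).get? "path").getD "")

theorem pvStepA_eq_modify (d : PySem.Dict String (List String)) (r : List (String × String)) :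
    pvStepA d r = match pvEntry? r with
      | none => d
      | some p => d.modify p.1 [] (fun ps => ps ++ [p.2]) := by
  unfold pvStepA pvEntry?
  cases h : (PySem.Dict.ofList r).get? "namespace" with
  | none => rfl
  | some ns =>
    by_cases hns : ns = "" <;> simp [hns]
    by_cases hc : d.contains ns
    · simp [hc]
    · -- insert then modify an absent key = modify alone
      simp [hc, PySem.Dict.modify, PySem.Dict.insert_insert_self, PySem.Dict.getD_insert_self]
      have hg : d.getD ns [] = ([] : List String) := by
        apply PySem.Dict.getD_of_not_contains
        simpa using hc
      rw [hg]
      simp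

theorem foldA_eq (fr : List (List (String × String))) (d : PySem.Dict String (List String)) :
    fr.foldl pvStepA d =
      (fr.filterMap pvEntry?).foldl (fun d p => d.modify p.1 [] (fun ps => ps ++ [p.2])) d := by
  induction fr generalizing d with
  | nil => rfl
  | cons r tl ih =>
    simp only [List.foldl_cons, List.filterMap_cons]
    rw [pvStepA_eq_modify]
    cases h : pvEntry? r <;> simp [ih]

theorem pvKeysStep_eq (ks : List String) (r : List (String × String)) :
    pvKeysStep ks r = match pvEntry? r with
      | none => ks
      | some p => PySem.Set.add ks p.1 := by
  unfold pvKeysStep pvEntry?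
  cases h : (PySem.Dict.ofList r).get? "namespace" with
  | none => rfl
  | some ns =>
    by_cases hns : ns = ""
    · simp [hns]
    · by_cases hm : ns ∈ ks <;>
        simp [hns, hm, PySem.Set.add, PySem.Set.contains]

theorem keysB_eq (fr : List (List (String × String))) (ks : List String) :
    fr.foldl pvKeysStep ks = PySem.Set.update ks ((fr.filterMap pvEntry?).map Prod.fst) := by
  induction fr generalizing ks with
  | nil => simp [PySem.Set.update]
  | cons r tl ih =>
    simp only [List.foldl_cons, List.filterMap_cons]
    rw [pvKeysStep_eq]
    cases h : pvEntry? r with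
    | none => simp [ih]
    | some p => simp [ih, PySem.Set.update_cons]

theorem pvEntry?_none_cond (r : List (String × String)) (ns : String) (hns : ns ≠ "")
    (hE : pvEntry? r = none) :
    ((PySem.Dict.ofList r).get? "namespace" == some ns) = false := by
  unfold pvEntry? at hE
  cases h : (PySem.Dict.ofList r).get? "namespace" with
  | none => simp
  | some m =>
    simp only [h] at hE
    by_cases hm : m = ""
    · simp [hm]
      exact hns
    · simp [hm] at hE

theorem pvEntry?_some_spec (r : List (String × String)) (m p : String)
    (hE : pvEntry? r = some (m, p)) :
    (PySem.Dict.ofList r).get? "namespace" = some m ∧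
      p = ((PySem.Dict.ofList r).get? "path").getD "" ∧ m ≠ "" := by
  unfold pvEntry? at hE
  cases h : (PySem.Dict.ofList r).get? "namespace" with
  | none => simp [h] at hE
  | some m' =>
    simp only [h] at hE
    by_cases hm : m' = ""
    · simp [hm] at hE
    · simp [hm] at hE
      obtain ⟨h1, h2⟩ := hE
      subst h1
      exact ⟨rfl, h2.symm, hm⟩

theorem groupB_eq (fr : List (List (String × String))) (ns : String) (hns : ns ≠ "") :
    (fr.filter (fun r => (PySem.Dict.ofList r).get? "namespace" == some ns)).map
        (fun r => ((PySem.Dict.ofList r).get? "path").getD "")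
      = ((fr.filterMap pvEntry?).filter (fun p => p.1 == ns)).map Prod.snd := by
  induction fr with
  | nil => rfl
  | cons r tl ih =>
    simp only [List.filter_cons, List.filterMap_cons]
    cases hE : pvEntry? r with
    | none => simp [pvEntry?_none_cond r ns hns hE, ih]
    | some q =>
      obtain ⟨m, p⟩ := q
      obtain ⟨h1, h2, _⟩ := pvEntry?_some_spec r m p hE
      by_cases hmn : m = ns
      · subst hmn; simp [h1, ih, ← h2]
      · simp [h1, hmn, ih]

theorem keys_ne_empty (fr : List (List (String × String))) (k : String)
    (hk : k ∈ PySem.Set.ofList ((fr.filterMap pvEntry?).map Prod.fst)) : k ≠ "" := by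
  rw [PySem.Set.mem_ofList] at hk
  obtain ⟨q, hq, hfst⟩ := List.mem_map.mp hk
  obtain ⟨r, _, hE⟩ := List.mem_filterMap.mp hq
  obtain ⟨_, _, hne⟩ := pvEntry?_some_spec r q.1 q.2 hE
  rw [← hfst]; exact hne

-- ===== VERDICT (by name: the statement is the Claim_ definition above) =====
theorem extract_namespaces_py_spec : Claim_equal_extract_namespaces_py := by
  intro fr _ _
  unfold Spec_extract_namespaces_py extract_namespaces_py extract_namespaces_py_alt
  rw [foldA_eq, keysB_eq]
  set L := fr.filterMap pvEntry? with hL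
  have hkeys : (L.foldl (fun d p => d.modify p.1 [] (fun ps => ps ++ [p.2]))
      (PySem.Dict.empty : PySem.Dict String (List String))).keys
      = PySem.Set.ofList (L.map Prod.fst) := by
    rw [PySem.Dict.keys_foldl_modify_key (key := Prod.fst)]
    simp [PySem.Dict.keys_empty, PySem.Set.update_nil_left]
  have hnd : (L.foldl (fun d p => d.modify p.1 [] (fun ps => ps ++ [p.2]))
      (PySem.Dict.empty : PySem.Dict String (List String))).keys.Nodup := by
    rw [hkeys]; exact PySem.Set.nodup_ofList _
  rw [PySem.Dict.items_eq_map_keys _ hnd []]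
  rw [hkeys, PySem.Set.update_nil_left]
  apply List.map_congr_left
  intro k hk
  have hne := keys_ne_empty fr k hk
  rw [groupB_eq fr k hne, ← hL]
  rw [PySem.Dict.getD_foldl_modify_append]
  simp [PySem.Dict.getD_empty]
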